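-- pv_equiv track=rewrite | github.com/frmoded/forge | forge/core/dependencies.py | apply_dependencies_to_body
-- ===== SOURCE A (Python) =====
-- from typing import List
--
-- _DEPS_HEADER = "# Dependencies"
--
-- _DEPS_NOTE = (
--   '*Synced from Python. Edit the Python and regenerate, or run '
--   '"Forge: Sync edges" to refresh.*'
-- )
--
-- def apply_dependencies_to_body(body: str, deps: List[str]) -> str:
--   """Insert/replace/remove the Dependencies section in a body.
--
--   Idempotent: applying the same deps twice produces the same string. The
--   section is placed at the bottom of the body. Empty deps removes the
--   section if present.
--   """
--   stripped = _strip_dependencies_section(body)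
--   trimmed = stripped.rstrip() + "\n"
--   if not deps:
--     return trimmed
--   links = " ".join(f"[[{d}]]" for d in deps)
--   section = f"{_DEPS_HEADER}\n\n{_DEPS_NOTE}\n\n{links}\n"
--   return trimmed + "\n" + section
--
-- def _strip_dependencies_section(body: str) -> str:
--   lines = body.splitlines()
--   out: list[str] = []
--   i = 0
--   while i < len(lines):
--     if lines[i].strip() == _DEPS_HEADER:
--       # skip until next top-level heading or EOF
--       i += 1
--       while i < len(lines) and not lines[i].lstrip().startswith("# "):
--         i += 1
--     else:
--       out.append(lines[i])
--       i += 1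
--   return "\n".join(out)
-- ===== SOURCE B (Python) =====
-- from typing import List
--
-- _DEPS_HEADER = "# Dependencies"
--
-- _DEPS_NOTE = (
--   '*Synced from Python. Edit the Python and regenerate, or run '
--   '"Forge: Sync edges" to refresh.*'
-- )
--
-- def apply_dependencies_to_body(body: str, deps: List[str]) -> str:
--   """Block-partition reimplementation: split the body into heading-started
--   blocks, drop the Dependencies block(s), re-join, then append the section."""
--   lines = body.splitlines()
--   blocks: list[list[str]] = []
--   cur: list[str] = []
--   for ln in lines:
--     if ln.lstrip().startswith("# "):
--       blocks.append(cur)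
--       cur = [ln]
--     else:
--       cur.append(ln)
--   blocks.append(cur)
--   kept = [ln for b in blocks if not (b and b[0].strip() == _DEPS_HEADER) for ln in b]
--   trimmed = "\n".join(kept).rstrip() + "\n"
--   if not deps:
--     return trimmed
--   links = " ".join(f"[[{d}]]" for d in deps)
--   return trimmed + "\n" + f"{_DEPS_HEADER}\n\n{_DEPS_NOTE}\n\n{links}\n"
-- ===== Notes on version B (the rewrite author's own statement) =====
-- stated objective: alternative
-- what changed: The stripping pass is re-decomposed: instead of A's index-based while loop that skips lines after a Dependencies header until the next heading, B partitions the lines into heading-started blocks with one fold and drops whole blocks whose first line strips to the header, then flattens the kept blocks.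
import Mathlib
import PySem

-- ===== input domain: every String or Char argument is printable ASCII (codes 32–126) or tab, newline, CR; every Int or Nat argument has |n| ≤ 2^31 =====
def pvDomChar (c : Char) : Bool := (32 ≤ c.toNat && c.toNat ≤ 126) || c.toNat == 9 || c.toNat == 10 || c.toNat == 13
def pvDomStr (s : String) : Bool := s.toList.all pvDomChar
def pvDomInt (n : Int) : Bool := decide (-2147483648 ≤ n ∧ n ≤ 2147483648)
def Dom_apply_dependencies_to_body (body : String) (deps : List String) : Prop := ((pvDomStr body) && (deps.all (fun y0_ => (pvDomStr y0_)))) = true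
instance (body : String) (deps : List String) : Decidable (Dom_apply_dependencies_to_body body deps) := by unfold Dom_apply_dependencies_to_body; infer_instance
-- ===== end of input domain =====

-- B replaces A's index-based skip loop by a partition of the body into heading-started
-- blocks followed by a block filter (objective: alternative decomposition, same cost).

-- module constants (shared by both Pythons)
def pvHdr : List Char := "# Dependencies".toList
def pvNote : List Char := "*Synced from Python. Edit the Python and regenerate, or run \"Forge: Sync edges\" to refresh.*".toList
-- ln.strip() == _DEPS_HEADER
def pvIsDeps (l : List Char) : Bool := PySem.Chars.strip l == pvHdr
-- ln.lstrip().startswith("# ")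
def pvIsHead (l : List Char) : Bool := PySem.Chars.startswith (PySem.Chars.lstrip l) "# ".toList

-- ===== PORT A =====
-- _strip_dependencies_section's while loop: the inner "skip until next top-level heading" is dropWhile
def pvStripA : List (List Char) → List (List Char)
  | [] => []
  | l :: ls =>
    if pvIsDeps l then pvStripA (ls.dropWhile (fun x => !pvIsHead x))
    else l :: pvStripA ls
termination_by ls => ls.length
decreasing_by
  · exact Nat.lt_succ_of_le (ls.length_dropWhile_le _)
  · simp

def apply_dependencies_to_body (body : String) (deps : List String) : String :=
  let stripped := PySem.Chars.join ['\n'] (pvStripA (PySem.Chars.splitlines body.toList))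
  let trimmed := PySem.Chars.rstrip stripped ++ ['\n']
  if deps.isEmpty then String.ofList trimmed
  else
    let links := PySem.Chars.join [' '] (deps.map (fun d => '[' :: '[' :: d.toList ++ [']', ']']))
    String.ofList (trimmed ++ '\n' :: pvHdr ++ '\n' :: '\n' :: pvNote ++ '\n' :: '\n' :: links ++ ['\n'])

-- ===== PORT B =====
-- not (b and b[0].strip() == _DEPS_HEADER)
def pvKeep : List (List Char) → Bool
  | [] => true
  | l :: _ => !(PySem.Chars.strip l == pvHdr)

-- loop body: start a new block at a heading line, else extend the current block
def pvBlocksStep (st : List (List (List Char)) × List (List Char)) (l : List Char) :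
    List (List (List Char)) × List (List Char) :=
  if pvIsHead l then (st.1 ++ [st.2], [l]) else (st.1, st.2 ++ [l])

def apply_dependencies_to_body_alt (body : String) (deps : List String) : String :=
  let lines := PySem.Chars.splitlines body.toList
  let st := lines.foldl pvBlocksStep ([], [])
  let kept := ((st.1 ++ [st.2]).filter pvKeep).flatten
  let trimmed := PySem.Chars.rstrip (PySem.Chars.join ['\n'] kept) ++ ['\n']
  if deps.isEmpty then String.ofList trimmed
  else
    let links := PySem.Chars.join [' '] (deps.map (fun d => '[' :: '[' :: d.toList ++ [']', ']']))
    String.ofList (trimmed ++ '\n' :: pvHdr ++ '\n' :: '\n' :: pvNote ++ '\n' :: '\n' :: links ++ ['\n'])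

-- ===== PRECONDITION & SPEC =====
def Spec_apply_dependencies_to_body (body : String) (deps : List String) (out : String) : Prop := out = apply_dependencies_to_body_alt body deps
instance (body : String) (deps : List String) (out : String) : Decidable (Spec_apply_dependencies_to_body body deps out) := by unfold Spec_apply_dependencies_to_body; infer_instance

-- ===== CLAIM (what is proved, stated in full; the proofs are below) =====
def Claim_equal_apply_dependencies_to_body : Prop := ∀ (body : String) (deps : List String), Dom_apply_dependencies_to_body body deps → Spec_apply_dependencies_to_body body deps (apply_dependencies_to_body body deps)

-- ===== LEMMAS AND PROOFS =====

-- a stripped deps-header line is in particular a heading line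
lemma isHead_of_isDeps {l : List Char} (h : pvIsDeps l = true) : pvIsHead l = true := by
  have hs : PySem.Chars.strip l = pvHdr := by simpa [pvIsDeps] using h
  have hpre : PySem.Chars.strip l <+: PySem.Chars.lstrip l := by
    simp only [PySem.Chars.strip, PySem.Chars.rstrip]
    conv_rhs => rw [← List.reverse_reverse (PySem.Chars.lstrip l)]
    exact (List.reverse_prefix).mpr (List.dropWhile_suffix _)
  have h2 : "# ".toList <+: pvHdr := by decide
  rw [pvIsHead, PySem.Chars.startswith_iff]
  exact h2.trans (hs ▸ hpre)

lemma keep_singleton (l : List Char) : pvKeep [l] = !pvIsDeps l := rfl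

-- B's fold/filter/flatten over an open block equals A's skip loop
lemma blocks_strip (ls : List (List Char)) :
    ∀ (bs : List (List (List Char))) (cur : List (List Char)),
    (((ls.foldl pvBlocksStep (bs, cur)).1 ++ [(ls.foldl pvBlocksStep (bs, cur)).2]).filter pvKeep).flatten
      = (bs.filter pvKeep).flatten ++
        (if pvKeep cur then cur ++ pvStripA ls
         else pvStripA (ls.dropWhile (fun x => !pvIsHead x))) := by
  induction ls with
  | nil =>
    intro bs cur
    simp only [List.foldl_nil, List.filter_append, List.flatten_append]
    by_cases hk : pvKeep cur = true <;> simp [hk, pvStripA]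
  | cons l ls ih =>
    intro bs cur
    by_cases hh : pvIsHead l = true
    · have hstep : pvBlocksStep (bs, cur) l = (bs ++ [cur], [l]) := by simp [pvBlocksStep, hh]
      rw [List.foldl_cons, hstep, ih]
      by_cases hd : pvIsDeps l = true
      · have hk1 : pvKeep [l] = false := by simp [keep_singleton, hd]
        have hA : pvStripA (l :: ls) = pvStripA (ls.dropWhile (fun x => !pvIsHead x)) := by
          rw [pvStripA]; simp [hd]
        have hdw : (l :: ls).dropWhile (fun x => !pvIsHead x) = l :: ls := by
          rw [List.dropWhile_cons_of_neg]; simp [hh]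
        rw [hk1, hdw, hA]
        by_cases hk : pvKeep cur = true <;> simp [hk, List.filter_append]
      · have hk1 : pvKeep [l] = true := by simp [keep_singleton, hd]
        have hA : pvStripA (l :: ls) = l :: pvStripA ls := by rw [pvStripA]; simp [hd]
        have hdw : (l :: ls).dropWhile (fun x => !pvIsHead x) = l :: ls := by
          rw [List.dropWhile_cons_of_neg]; simp [hh]
        rw [hk1, hdw, hA]
        by_cases hk : pvKeep cur = true <;> simp [hk, List.filter_append]
    · have hnd : pvIsDeps l = false := by
        by_contra hc
        exact hh (isHead_of_isDeps (by simpa using hc))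
      have hstep : pvBlocksStep (bs, cur) l = (bs, cur ++ [l]) := by simp [pvBlocksStep, hh]
      rw [List.foldl_cons, hstep, ih]
      have hkeq : pvKeep (cur ++ [l]) = pvKeep cur := by
        cases cur with
        | nil =>
          have hne : ¬ PySem.Chars.strip l = pvHdr := by simpa [pvIsDeps] using hnd
          simp [pvKeep, hne]
        | cons c t => rfl
      have hA : pvStripA (l :: ls) = l :: pvStripA ls := by rw [pvStripA]; simp [hnd]
      have hdw : (l :: ls).dropWhile (fun x => !pvIsHead x) = ls.dropWhile (fun x => !pvIsHead x) := by
        rw [List.dropWhile_cons_of_pos]; simp [hh]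
      rw [hkeq, hdw, hA]
      by_cases hk : pvKeep cur = true <;> simp [hk]

lemma strip_eq (lines : List (List Char)) :
    (((lines.foldl pvBlocksStep ([], [])).1 ++ [(lines.foldl pvBlocksStep ([], [])).2]).filter pvKeep).flatten
      = pvStripA lines := by
  have := blocks_strip lines [] []
  simpa [pvKeep] using this

-- ===== VERDICT (by name: the statement is the Claim_ definition above) =====
theorem apply_dependencies_to_body_spec : Claim_equal_apply_dependencies_to_body := by
  intro body deps _
  unfold Spec_apply_dependencies_to_body apply_dependencies_to_body apply_dependencies_to_body_alt
  simp only [strip_eq]
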